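-- pv_equiv track=rewrite | github.com/AndreiArzhantsev/LogaDog | answer_guesser.py | sum_over_k_subsets
-- ===== SOURCE A (Python) =====
-- import itertools
-- from typing import List, Tuple, Optional, Dict
--
-- def sum_over_k_subsets(
--     A: List[List[Tuple[str, List[str]]]],
--     k: int
-- ) -> int:
--     total = 0
--     for subset in itertools.combinations(A, k):
--         product = 1
--         for task in subset:
--             for _, vals in task:
--                 product *= (len(vals)if len(vals) > 0 else 4)
--         total += product
--     return total
-- ===== SOURCE B (Python) =====
-- def sum_over_k_subsets(A, k):
--     # e_k of per-element weights via the elementary-symmetric-polynomial DP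
--     if k < 0 or k > len(A):
--         return 0
--     ws = []
--     for task in A:
--         w = 1
--         for _, vals in task:
--             w *= len(vals) if vals else 4
--         ws.append(w)
--     e = [1] + [0] * k
--     for w in reversed(ws):
--         e = [1] + [cur + w * prev for prev, cur in zip(e, e[1:])]
--     return e[k]
-- ===== Notes on version B (the rewrite author's own statement) =====
-- stated objective: alternative
-- what changed: Instead of enumerating all C(n,k) subsets and multiplying per subset, B computes one weight per element and evaluates the k-th elementary symmetric polynomial with a DP table of size k+1 (O(n*k) after weights; no speedup measured on the probe's small-k inputs).
import Mathlib
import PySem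

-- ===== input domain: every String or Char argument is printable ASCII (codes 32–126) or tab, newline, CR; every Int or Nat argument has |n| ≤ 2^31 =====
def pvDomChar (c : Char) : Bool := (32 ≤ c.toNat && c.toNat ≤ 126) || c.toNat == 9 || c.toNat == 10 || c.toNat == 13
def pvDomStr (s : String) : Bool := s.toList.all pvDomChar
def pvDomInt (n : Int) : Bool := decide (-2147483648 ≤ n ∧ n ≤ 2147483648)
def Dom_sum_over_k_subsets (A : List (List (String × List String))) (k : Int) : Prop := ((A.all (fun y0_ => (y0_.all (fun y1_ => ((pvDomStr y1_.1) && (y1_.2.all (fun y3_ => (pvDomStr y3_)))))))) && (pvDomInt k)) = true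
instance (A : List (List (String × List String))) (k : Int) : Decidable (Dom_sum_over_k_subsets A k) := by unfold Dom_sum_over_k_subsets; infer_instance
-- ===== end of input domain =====

-- B replaces the C(n,k)-subset enumeration by the elementary-symmetric-polynomial DP over per-element weights (alternative algorithm).

-- ===== PORT A =====
-- itertools.combinations(A, k) in index order (k = r.toNat; Pre_ keeps k ≥ 0 since Python raises otherwise)
def pvCombos {α : Type} : List α → Nat → List (List α)
  | _, 0 => [[]]
  | [], _ + 1 => []
  | x :: xs, j + 1 => ((pvCombos xs j).map (x :: ·)) ++ pvCombos xs (j + 1)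

def sum_over_k_subsets (A : List (List (String × List String))) (k : Int) : Int :=
  (pvCombos A k.toNat).foldl
    (fun total subset =>
      total + subset.foldl
        (fun product task =>
          task.foldl (fun p pr => p * (if pr.2.length > 0 then (pr.2.length : Int) else 4)) product)
        1)
    0

-- ===== PORT B =====
def pvWeight (task : List (String × List String)) : Int :=
  task.foldl (fun p pr => p * (if pr.2.length > 0 then (pr.2.length : Int) else 4)) 1

def pvStep (w : Int) (e : List Int) : List Int :=
  1 :: List.zipWith (fun prev cur => cur + w * prev) e e.tail

def sum_over_k_subsets_alt (A : List (List (String × List String))) (k : Int) : Int :=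
  if k < 0 ∨ (A.length : Int) < k then 0
  else
    let ws := A.map pvWeight
    let e := (ws.reverse).foldl (fun e w => pvStep w e) (1 :: List.replicate k.toNat 0)
    e.getD k.toNat 0

-- ===== PRECONDITION & SPEC =====
-- Pre_ excludes only k < 0, where itertools.combinations raises ValueError (A never returns there).
def Pre_sum_over_k_subsets (A : List (List (String × List String))) (k : Int) : Prop := 0 ≤ k
instance (A : List (List (String × List String))) (k : Int) : Decidable (Pre_sum_over_k_subsets A k) := by unfold Pre_sum_over_k_subsets; infer_instance
def pvWitness_sum_over_k_subsets : (List (List (String × List String))) × Int :=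
  ([[("a", ["x", "y"])], [("b", [])]], 1)

def Spec_sum_over_k_subsets (A : List (List (String × List String))) (k : Int) (out : Int) : Prop := out = sum_over_k_subsets_alt A k
instance (A : List (List (String × List String))) (k : Int) (out : Int) : Decidable (Spec_sum_over_k_subsets A k out) := by unfold Spec_sum_over_k_subsets; infer_instance

-- ===== CLAIM (what is proved, stated in full; the proofs are below) =====
def Claim_equal_sum_over_k_subsets : Prop := ∀ (A : List (List (String × List String))) (k : Int), Dom_sum_over_k_subsets A k → Pre_sum_over_k_subsets A k → Spec_sum_over_k_subsets A k (sum_over_k_subsets A k)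

-- ===== LEMMAS AND PROOFS =====

-- the k-th elementary symmetric polynomial of the weight list, phrased through A's combination order
def pvEsym (j : Nat) (ws : List Int) : Int := ((pvCombos ws j).map List.prod).sum

theorem pvFoldlMul {α : Type} (f : α → Int) (l : List α) (a : Int) :
    l.foldl (fun p x => p * f x) a = a * (l.map f).prod := by
  induction l generalizing a with
  | nil => simp
  | cons x xs ih => simp [ih, mul_assoc]

theorem pvInnerProd (s : List (List (String × List String))) (a : Int) :
    s.foldl
      (fun product task =>
        task.foldl (fun p pr => p * (if pr.2.length > 0 then (pr.2.length : Int) else 4)) product)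
      a = a * (s.map pvWeight).prod := by
  induction s generalizing a with
  | nil => simp
  | cons t ts ih =>
    simp only [List.foldl_cons, List.map_cons, List.prod_cons]
    rw [ih, pvFoldlMul]
    unfold pvWeight
    rw [pvFoldlMul]
    ring

theorem pvFoldlAdd (f : List (List (String × List String)) → Int)
    (l : List (List (List (String × List String)))) (a : Int) :
    l.foldl (fun t s => t + f s) a = a + (l.map f).sum := by
  induction l generalizing a with
  | nil => simp
  | cons x xs ih => simp [ih, add_assoc]

theorem pvCombosMap {α β : Type} (f : α → β) (l : List α) (j : Nat) :
    pvCombos (l.map f) j = (pvCombos l j).map (List.map f) := by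
  induction l generalizing j with
  | nil => cases j <;> simp [pvCombos]
  | cons x xs ih =>
    cases j with
    | zero => simp [pvCombos]
    | succ j => simp [pvCombos, ih, List.map_map]

theorem pvCombosNil {α : Type} (l : List α) (j : Nat) (h : l.length < j) :
    pvCombos l j = [] := by
  induction l generalizing j with
  | nil => cases j with
    | zero => omega
    | succ j => simp [pvCombos]
  | cons x xs ih =>
    cases j with
    | zero => omega
    | succ j =>
      simp only [pvCombos, List.append_eq_nil_iff, List.map_eq_nil_iff]
      constructor
      · exact ih j (by simpa using h)
      · exact ih (j + 1) (by simp only [List.length_cons] at h; omega)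

theorem pvEsymZero (ws : List Int) : pvEsym 0 ws = 1 := by
  simp [pvEsym, pvCombos]

theorem pvEsymNil (j : Nat) : pvEsym (j + 1) [] = 0 := by
  simp [pvEsym, pvCombos]

theorem pvEsymCons (j : Nat) (w : Int) (ws : List Int) :
    pvEsym (j + 1) (w :: ws) = w * pvEsym j ws + pvEsym (j + 1) ws := by
  simp only [pvEsym, pvCombos, List.map_append, List.sum_append, List.map_map]
  congr 1
  induction pvCombos ws j with
  | nil => simp
  | cons s ss ih => simp [ih]; ring

-- the DP state after processing ws (from the right) is the table of esym values
theorem pvStepCorrect (w : Int) (ws : List Int) (k : Nat) :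
    pvStep w ((List.range (k + 1)).map (fun j => pvEsym j ws)) =
      (List.range (k + 1)).map (fun j => pvEsym j (w :: ws)) := by
  apply List.ext_getElem
  · simp [pvStep, List.length_zipWith]
  · intro i h1 h2
    simp only [List.length_map, List.length_range] at h2
    cases i with
    | zero => simp [pvStep, pvEsymZero]
    | succ i =>
      have hi : i + 1 < k + 1 := h2
      simp only [pvStep, List.getElem_cons_succ]
      rw [List.getElem_zipWith]
      rw [List.getElem_tail]
      simp only [List.getElem_map, List.getElem_range]
      rw [pvEsymCons]
      ring

theorem pvDpCorrect (ws : List Int) (k : Nat) :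
    List.foldr pvStep (1 :: List.replicate k 0) ws =
      (List.range (k + 1)).map (fun j => pvEsym j ws) := by
  induction ws with
  | nil =>
    simp only [List.foldr_nil]
    apply List.ext_getElem
    · simp
    · intro i h1 h2
      cases i with
      | zero => simp [pvEsymZero]
      | succ i =>
        simp only [List.getElem_cons_succ, List.getElem_replicate, List.getElem_map,
          List.getElem_range, pvEsymNil]
  | cons w ws ih =>
    simp only [List.foldr_cons, ih, pvStepCorrect]

theorem pvAeqEsym (A : List (List (String × List String))) (j : Nat) :
    ((pvCombos A j).map (fun s => (s.map pvWeight).prod)).sum = pvEsym j (A.map pvWeight) := by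
  simp [pvEsym, pvCombosMap, List.map_map]
  rfl

-- ===== VERDICT (by name: the statement is the Claim_ definition above) =====
theorem sum_over_k_subsets_spec : Claim_equal_sum_over_k_subsets := by
  intro A k _ hk
  unfold Pre_sum_over_k_subsets at hk
  unfold Spec_sum_over_k_subsets sum_over_k_subsets
  simp only [sum_over_k_subsets_alt]
  rw [pvFoldlAdd (fun s => s.foldl
        (fun product task =>
          task.foldl (fun p pr => p * (if pr.2.length > 0 then (pr.2.length : Int) else 4)) product)
        1)]
  have hfold : ((pvCombos A k.toNat).map (fun s => s.foldl
        (fun product task =>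
          task.foldl (fun p pr => p * (if pr.2.length > 0 then (pr.2.length : Int) else 4)) product)
        1)).sum = ((pvCombos A k.toNat).map (fun s => (s.map pvWeight).prod)).sum := by
    congr 1
    apply List.map_congr_left
    intro s _
    rw [pvInnerProd]
    ring
  rw [zero_add, hfold, pvAeqEsym]
  by_cases hbig : (A.length : Int) < k
  · have : A.length < k.toNat := by omega
    rw [if_pos (Or.inr hbig)]
    unfold pvEsym
    rw [pvCombosNil (A.map pvWeight) k.toNat (by simpa using this)]
    simp
  · rw [if_neg (by omega)]
    simp only [List.foldl_reverse, pvDpCorrect]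
    have hk' : k.toNat < k.toNat + 1 := Nat.lt_succ_self _
    rw [List.getD_eq_getElem?_getD, List.getElem?_map, List.getElem?_range hk']
    simp
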